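-- pv_equiv track=rewrite | github.com/kasztelmacko/willsee | src/pbn/canvas/utils/merge_facets.py | compute_merge_targets
-- ===== SOURCE A (Python) =====
-- AdjacencyList = list[list[tuple[int, int]]]
--
-- def compute_merge_targets(
--     facet_sizes: list[int],
--     adjacency_list: AdjacencyList,
--     facet_ids_to_merge: list[int],
-- ) -> dict[int, int]:
--     """
--     For each merge-eligible facet, choose a neighbouring facet to merge into,
--     based on maximum shared boundary length.
--     """
--     merge_target: dict[int, int] = {}
--     merge_ids_set = set(facet_ids_to_merge)
--
--     for facet_id in range(len(facet_sizes)):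
--         if facet_id not in merge_ids_set:
--             continue
--
--         neighbours_info = adjacency_list[facet_id]
--         if not neighbours_info:
--             continue
--
--         best_neighbor, best_len = None, -1
--         for neighbor_id, boundary_len in neighbours_info:
--             if neighbor_id == facet_id:
--                 continue
--             if neighbor_id not in merge_ids_set and boundary_len > best_len:
--                 best_neighbor, best_len = neighbor_id, boundary_len
--
--         if best_neighbor is None:
--             for neighbor_id, boundary_len in neighbours_info:
--                 if neighbor_id == facet_id:
--                     continue
--                 if boundary_len > best_len:
--                     best_neighbor, best_len = neighbor_id, boundary_len
--
--         if best_neighbor is not None: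
--             merge_target[facet_id] = best_neighbor
--
--     return merge_target
-- ===== SOURCE B (Python) =====
-- def compute_merge_targets(facet_sizes, adjacency_list, facet_ids_to_merge):
--     """Single scan per facet: running best neighbour ranked by the composite key
--     (neighbour not merge-eligible, boundary length), strict improvement so the
--     first neighbour wins ties; neighbours with negative boundary length and the
--     facet itself are never candidates."""
--     merge_ids = set(facet_ids_to_merge)
--     targets = {}
--     for fid in range(len(facet_sizes)):
--         if fid not in merge_ids:
--             continue
--         best = None  # (key, neighbour_id)
--         for nid, blen in adjacency_list[fid]:
--             if nid == fid or blen < 0: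
--                 continue
--             key = (nid not in merge_ids, blen)
--             if best is None or key > best[0]:
--                 best = (key, nid)
--         if best is not None:
--             targets[fid] = best[1]
--     return targets
-- ===== Notes on version B (the rewrite author's own statement) =====
-- stated objective: simpler
-- what changed: The two separate neighbour scans (prefer non-merge-eligible, then fallback over all neighbours) are replaced by one scan per facet keeping a single running best ranked lexicographically by the composite key (neighbour not merge-eligible, boundary length), with strict improvement so the first neighbour wins ties; self-loops and negative boundary lengths are skipped.
import Mathlib
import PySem

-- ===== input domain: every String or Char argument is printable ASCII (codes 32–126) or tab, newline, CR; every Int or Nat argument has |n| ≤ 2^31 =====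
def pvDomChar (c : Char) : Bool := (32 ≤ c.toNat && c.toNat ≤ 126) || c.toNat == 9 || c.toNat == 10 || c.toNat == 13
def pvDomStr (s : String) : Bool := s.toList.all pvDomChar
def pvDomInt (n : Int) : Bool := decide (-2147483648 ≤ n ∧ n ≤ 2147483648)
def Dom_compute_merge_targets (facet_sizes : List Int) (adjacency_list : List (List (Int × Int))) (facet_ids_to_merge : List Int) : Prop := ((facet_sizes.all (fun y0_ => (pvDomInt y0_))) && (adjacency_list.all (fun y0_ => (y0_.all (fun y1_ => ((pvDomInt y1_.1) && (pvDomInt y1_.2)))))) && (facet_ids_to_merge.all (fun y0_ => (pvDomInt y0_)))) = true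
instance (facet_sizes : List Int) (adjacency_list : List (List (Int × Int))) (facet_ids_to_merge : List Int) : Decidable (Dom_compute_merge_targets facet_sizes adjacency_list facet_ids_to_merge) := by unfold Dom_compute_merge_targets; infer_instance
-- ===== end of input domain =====

-- B replaces A's two neighbour scans (prefer non-merge, then fallback) by one scan with a
-- composite lexicographic key (not-merge-eligible, boundary length); objective: simpler.


-- ===== PORT A =====
-- first neighbour loop: prefer neighbours not in the merge set, track (best_neighbor, best_len)
def cmtA_step1 (fid : Int) (mset : List Int) (s : Option Int × Int) (p : Int × Int) : Option Int × Int :=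
  if p.1 = fid then s
  else if p.1 ∉ mset ∧ s.2 < p.2 then (some p.1, p.2) else s

-- fallback loop: any neighbour, starting from the first loop's state
def cmtA_step2 (fid : Int) (s : Option Int × Int) (p : Int × Int) : Option Int × Int :=
  if p.1 = fid then s
  else if s.2 < p.2 then (some p.1, p.2) else s

-- the two loops and the 'best_neighbor is None' fallback check, as in A
def cmtA_best (fid : Int) (mset : List Int) (nb : List (Int × Int)) : Option Int :=
  let s1 := nb.foldl (cmtA_step1 fid mset) (none, -1)
  if s1.1 = none then (nb.foldl (cmtA_step2 fid) s1).1 else s1.1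

def compute_merge_targets (facet_sizes : List Int) (adjacency_list : List (List (Int × Int))) (facet_ids_to_merge : List Int) : List (Int × Int) :=
  let mset := PySem.Set.ofList facet_ids_to_merge
  (List.range facet_sizes.length).foldl (fun acc (i : Nat) =>
    if (i : Int) ∈ mset then
      let nb := adjacency_list.getD i []   -- adjacency_list[facet_id]; Pre_ guarantees the index is in range
      if nb = [] then acc
      else
        match cmtA_best (i : Int) mset nb with
        | some n => acc ++ [((i : Int), n)]
        | none => acc
    else acc) []

-- ===== PORT B =====
-- Python's lexicographic '>' on the (Bool, int) key (False < True)
def cmtB_keyGT (k1 k2 : Bool × Int) : Bool :=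
  (k1.1 && !k2.1) || (k1.1 == k2.1 && decide (k2.2 < k1.2))

-- single scan: running best as (key, neighbour_id)
def cmtB_step (fid : Int) (mset : List Int) (b : Option ((Bool × Int) × Int)) (p : Int × Int) : Option ((Bool × Int) × Int) :=
  if p.1 = fid ∨ p.2 < 0 then b
  else
    let key : Bool × Int := (decide (p.1 ∉ mset), p.2)
    match b with
    | none => some (key, p.1)
    | some (bk, bn) => if cmtB_keyGT key bk then some (key, p.1) else some (bk, bn)

def cmtB_scan (fid : Int) (mset : List Int) (nb : List (Int × Int)) : Option ((Bool × Int) × Int) :=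
  nb.foldl (cmtB_step fid mset) none

def compute_merge_targets_alt (facet_sizes : List Int) (adjacency_list : List (List (Int × Int))) (facet_ids_to_merge : List Int) : List (Int × Int) :=
  let mset := PySem.Set.ofList facet_ids_to_merge
  (List.range facet_sizes.length).foldl (fun acc (i : Nat) =>
    if (i : Int) ∈ mset then
      match cmtB_scan (i : Int) mset (adjacency_list.getD i []) with
      | some (_, n) => acc ++ [((i : Int), n)]
      | none => acc
    else acc) []

-- ===== PRECONDITION & SPEC =====
-- Pre_ excludes exactly the inputs where Python A raises IndexError: a merge-eligible
-- facet id below len(facet_sizes) with no row in adjacency_list (B raises there too).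
def Pre_compute_merge_targets (facet_sizes : List Int) (adjacency_list : List (List (Int × Int))) (facet_ids_to_merge : List Int) : Prop :=
  ∀ i : Nat, i < facet_sizes.length → (i : Int) ∈ facet_ids_to_merge → i < adjacency_list.length
instance (facet_sizes : List Int) (adjacency_list : List (List (Int × Int))) (facet_ids_to_merge : List Int) : Decidable (Pre_compute_merge_targets facet_sizes adjacency_list facet_ids_to_merge) := by unfold Pre_compute_merge_targets; infer_instance

def pvWitness_compute_merge_targets : List Int × (List (List (Int × Int))) × List Int :=
  ([4, 2, 7], [[(1, 3), (2, 5)], [(0, 3), (2, 1)], [(0, 5), (1, 1)]], [1])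

def Spec_compute_merge_targets (facet_sizes : List Int) (adjacency_list : List (List (Int × Int))) (facet_ids_to_merge : List Int) (out : List (Int × Int)) : Prop := out = compute_merge_targets_alt facet_sizes adjacency_list facet_ids_to_merge
instance (facet_sizes : List Int) (adjacency_list : List (List (Int × Int))) (facet_ids_to_merge : List Int) (out : List (Int × Int)) : Decidable (Spec_compute_merge_targets facet_sizes adjacency_list facet_ids_to_merge out) := by unfold Spec_compute_merge_targets; infer_instance

-- ===== CLAIM (what is proved, stated in full; the proofs are below) =====
def Claim_equal_compute_merge_targets : Prop := ∀ (facet_sizes : List Int) (adjacency_list : List (List (Int × Int))) (facet_ids_to_merge : List Int), Dom_compute_merge_targets facet_sizes adjacency_list facet_ids_to_merge → Pre_compute_merge_targets facet_sizes adjacency_list facet_ids_to_merge → Spec_compute_merge_targets facet_sizes adjacency_list facet_ids_to_merge (compute_merge_targets facet_sizes adjacency_list facet_ids_to_merge)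

-- ===== LEMMAS AND PROOFS =====

-- simultaneous-state invariant tying B's single best to A's two loop states
def cmtInv (s1 s2 : Option Int × Int) (sB : Option ((Bool × Int) × Int)) : Prop :=
  match sB with
  | none => s1 = (none, -1) ∧ s2 = (none, -1)
  | some ((true, l), n) => s1 = (some n, l) ∧ 0 ≤ l
  | some ((false, l), n) => s1 = (none, -1) ∧ s2 = (some n, l) ∧ 0 ≤ l

theorem cmtInv_step (fid : Int) (mset : List Int) (s1 s2 : Option Int × Int)
    (sB : Option ((Bool × Int) × Int)) (p : Int × Int) (h : cmtInv s1 s2 sB) :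
    cmtInv (cmtA_step1 fid mset s1 p) (cmtA_step2 fid s2 p) (cmtB_step fid mset sB p) := by
  obtain ⟨nid, blen⟩ := p
  by_cases hf : nid = fid
  · rcases sB with _ | ⟨⟨b, l⟩, n⟩
    · simpa [cmtA_step1, cmtA_step2, cmtB_step, hf] using h
    · cases b <;> simpa [cmtA_step1, cmtA_step2, cmtB_step, hf] using h
  by_cases hneg : blen < 0
  · rcases sB with _ | ⟨⟨b, l⟩, n⟩
    · obtain ⟨h1, h2⟩ := h
      simp [cmtA_step1, cmtA_step2, cmtB_step, hf, hneg, h1, h2, cmtInv]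
      omega
    · cases b
      · obtain ⟨h1, h2, hl⟩ := h
        simp [cmtA_step1, cmtA_step2, cmtB_step, hf, hneg, h1, h2, cmtInv]
        omega
      · obtain ⟨h1, hl⟩ := h
        simp [cmtA_step1, cmtB_step, hf, hneg, h1, cmtInv]
        omega
  by_cases hm : nid ∈ mset
  · -- merge-eligible neighbour: key = (false, blen)
    rcases sB with _ | ⟨⟨b, l⟩, n⟩
    · obtain ⟨h1, h2⟩ := h
      simp [cmtA_step1, cmtA_step2, cmtB_step, hf, hneg, hm, h1, h2, cmtInv]
      omega
    · cases b
      · obtain ⟨h1, h2, hl⟩ := h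
        by_cases hlt : l < blen <;>
          simp [cmtA_step1, cmtA_step2, cmtB_step, cmtB_keyGT, hf, hneg, hm, h1, h2, hlt, cmtInv] <;>
          omega
      · obtain ⟨h1, hl⟩ := h
        simp [cmtA_step1, cmtB_step, cmtB_keyGT, hf, hneg, hm, h1, cmtInv, hl]
  · -- non-merge neighbour: key = (true, blen)
    rcases sB with _ | ⟨⟨b, l⟩, n⟩
    · obtain ⟨h1, h2⟩ := h
      simp [cmtA_step1, cmtB_step, hf, hneg, hm, h1, cmtInv]
      omega
    · cases b
      · obtain ⟨h1, h2, hl⟩ := h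
        simp [cmtA_step1, cmtB_step, cmtB_keyGT, hf, hneg, hm, h1, cmtInv]
        omega
      · obtain ⟨h1, hl⟩ := h
        by_cases hlt : l < blen <;>
          simp [cmtA_step1, cmtB_step, cmtB_keyGT, hf, hneg, hm, h1, hlt, cmtInv] <;>
          omega

theorem cmtInv_foldl (fid : Int) (mset : List Int) (nb : List (Int × Int)) :
    ∀ (s1 s2 : Option Int × Int) (sB : Option ((Bool × Int) × Int)), cmtInv s1 s2 sB →
      cmtInv (nb.foldl (cmtA_step1 fid mset) s1) (nb.foldl (cmtA_step2 fid) s2)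
        (nb.foldl (cmtB_step fid mset) sB) := by
  induction nb with
  | nil => intro s1 s2 sB h; simpa using h
  | cons p t ih =>
      intro s1 s2 sB h
      simpa using ih _ _ _ (cmtInv_step fid mset s1 s2 sB p h)

theorem cmt_best_eq (fid : Int) (mset : List Int) (nb : List (Int × Int)) :
    cmtA_best fid mset nb = (cmtB_scan fid mset nb).map (fun x => x.2) := by
  have h := cmtInv_foldl fid mset nb (none, -1) (none, -1) none ⟨rfl, rfl⟩
  unfold cmtA_best cmtB_scan
  rcases hB : nb.foldl (cmtB_step fid mset) none with _ | ⟨⟨b, l⟩, n⟩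
  · rw [hB] at h
    obtain ⟨h1, h2⟩ := h
    simp [h1, h2]
  · rw [hB] at h
    cases b
    · obtain ⟨h1, h2', hl⟩ := h
      simp [h1, h2']
    · obtain ⟨h1, hl⟩ := h
      simp [h1]

theorem cmt_step_fun_eq (al : List (List (Int × Int))) (mset : List Int) :
    (fun (acc : List (Int × Int)) (i : Nat) =>
      if (i : Int) ∈ mset then
        let nb := al.getD i []
        if nb = [] then acc
        else
          match cmtA_best (i : Int) mset nb with
          | some n => acc ++ [((i : Int), n)]
          | none => acc
      else acc)
    = (fun (acc : List (Int × Int)) (i : Nat) =>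
      if (i : Int) ∈ mset then
        match cmtB_scan (i : Int) mset (al.getD i []) with
        | some (_, n) => acc ++ [((i : Int), n)]
        | none => acc
      else acc) := by
  funext acc i
  by_cases hm : (i : Int) ∈ mset
  · simp only [hm, if_true]
    by_cases hnb : al.getD i [] = ([] : List (Int × Int))
    · simp only [hnb]
      simp [cmtB_scan]
    · simp only [hnb, if_false]
      rw [cmt_best_eq]
      rcases cmtB_scan (i : Int) mset (al.getD i []) with _ | ⟨⟨b, l⟩, n⟩ <;> simp
  · simp [hm]

-- ===== VERDICT (by name: the statement is the Claim_ definition above) =====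
theorem compute_merge_targets_spec : Claim_equal_compute_merge_targets := by
  intro fs al ids _ _
  unfold Spec_compute_merge_targets compute_merge_targets compute_merge_targets_alt
  simp only [cmt_step_fun_eq]
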